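-- pv_equiv track=rewrite | github.com/katherine999/MetaIBM | other beta versions/metacommunity_IBM_v.2_9_13_beta_version.py | sub_state
-- ===== SOURCE A (Python) =====
-- def sub_state(s):
--     ''' return list of sub set of state s'''
--     ls = []
--     ss = s
--     while ss > 0:
--         ss -= 1
--         ss &= s
--         ls.append(ss)
--     return ls
-- ===== SOURCE B (Python) =====
-- def sub_state(s):
--     ''' return list of sub set of state s'''
--     def full(m):
--         # all submasks of m, in decreasing order (m itself first, 0 last)
--         if m <= 0:
--             return [0]
--         h = 1 << (m.bit_length() - 1)
--         rest = full(m - h)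
--         return [h + x for x in rest] + rest
--     return full(s)[1:]
-- ===== Notes on version B (the rewrite author's own statement) =====
-- stated objective: alternative
-- what changed: Replaces the submask-hopping loop (ss = (ss-1) & s) with a recursive generator that splits off the highest set bit and concatenates the shifted and unshifted submask lists of the rest.
import Mathlib
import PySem

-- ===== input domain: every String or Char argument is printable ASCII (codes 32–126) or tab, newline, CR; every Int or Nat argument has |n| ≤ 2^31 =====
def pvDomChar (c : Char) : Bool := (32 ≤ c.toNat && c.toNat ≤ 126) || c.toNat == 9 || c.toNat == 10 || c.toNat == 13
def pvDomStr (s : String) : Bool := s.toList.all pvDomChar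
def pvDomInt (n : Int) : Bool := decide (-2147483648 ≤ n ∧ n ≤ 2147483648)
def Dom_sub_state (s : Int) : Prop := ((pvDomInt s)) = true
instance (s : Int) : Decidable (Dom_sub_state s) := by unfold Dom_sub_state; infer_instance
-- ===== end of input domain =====

-- B replaces A's submask-hopping loop by a recursive generator over the highest set bit; return value only, no side effects.

-- ===== PORT A =====
-- while ss > 0: ss -= 1; ss &= s; ls.append(ss) — fuel s.toNat bounds the iteration count
-- (each step strictly decreases ss, so it is always sufficient; it only makes the loop total).
def subStateLoop (s : Int) : Int → Nat → List Int
  | _, 0 => []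
  | ss, fuel + 1 =>
    if 0 < ss then
      (PySem.Int.band (ss - 1) s) :: subStateLoop s (PySem.Int.band (ss - 1) s) fuel
    else []

def sub_state (s : Int) : List Int := subStateLoop s s s.toNat

-- ===== PORT B =====
-- termination of full(m): m - (1 << (m.bit_length() - 1)) is a smaller nonnegative number
theorem pvFullSubDec (m : Int) (h0 : ¬ m ≤ 0) :
    (m - 2 ^ (PySem.Int.bitLength m - 1)).toNat < m.toNat := by
  have h1 := PySem.Int.two_pow_bitLength_le m (by omega)
  have h3 : ((2 : Int) ^ (PySem.Int.bitLength m - 1)) =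
      ((2 ^ (PySem.Int.bitLength m - 1) : Nat) : Int) := by push_cast; ring
  have h2 : (0 : Nat) < 2 ^ (PySem.Int.bitLength m - 1) := Nat.two_pow_pos _
  omega

-- full(m): all submasks of m in decreasing order; 1 << k is ported as 2 ^ k (exact, k : Nat)
def fullSub (m : Int) : List Int :=
  if h0 : m ≤ 0 then [0]
  else
    (fullSub (m - 2 ^ (PySem.Int.bitLength m - 1))).map
        (fun x => 2 ^ (PySem.Int.bitLength m - 1) + x) ++
      fullSub (m - 2 ^ (PySem.Int.bitLength m - 1))
termination_by m.toNat
decreasing_by all_goals exact pvFullSubDec m h0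

-- full(s)[1:]
def sub_state_alt (s : Int) : List Int := (fullSub s).drop 1

-- ===== PRECONDITION & SPEC =====
def Spec_sub_state (s : Int) (out : List Int) : Prop := out = sub_state_alt s
instance (s : Int) (out : List Int) : Decidable (Spec_sub_state s out) := by unfold Spec_sub_state; infer_instance

-- ===== CLAIM (what is proved, stated in full; the proofs are below) =====
def Claim_equal_sub_state : Prop := ∀ (s : Int), Dom_sub_state s → Spec_sub_state s (sub_state s)

-- ===== LEMMAS AND PROOFS =====

-- binary decomposition of Nat &&&, in an omega-friendly form
theorem pvAndDecomp (x y : Nat) : x &&& y = 2 * (x / 2 &&& y / 2) + min (x % 2) (y % 2) := by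
  have h1 : (x &&& y) / 2 = x / 2 &&& y / 2 := Nat.and_div_two
  have h2 : (x &&& y) % 2 = 1 ↔ x % 2 = 1 ∧ y % 2 = 1 := Nat.and_mod_two_eq_one
  have h3 : (x &&& y) % 2 = min (x % 2) (y % 2) := by
    rcases Nat.mod_two_eq_zero_or_one x with hx | hx <;>
      rcases Nat.mod_two_eq_zero_or_one y with hy | hy <;>
        rcases Nat.mod_two_eq_zero_or_one (x &&& y) with h | h <;>
          simp [hx, hy, h] at h2 ⊢
  omega

-- (a &&& b) &&& b = a &&& b, lifted to PySem's Int band on nonnegative arguments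
theorem pvBandIdem (a b : Int) (ha : 0 ≤ a) (hb : 0 ≤ b) :
    PySem.Int.band (PySem.Int.band a b) b = PySem.Int.band a b := by
  rw [PySem.Int.band_of_nonneg ha hb, PySem.Int.band_of_nonneg (Int.natCast_nonneg _) hb]
  simp [Nat.and_self_right]

-- every submask i of n below m lies at or below (m-1) &&& n, provided m itself is a submask of n
theorem pvSubMaskL (m : Nat) : ∀ n i : Nat, m &&& n = m → i &&& n = i → i < m →
    i ≤ (m - 1) &&& n := by
  induction m using Nat.strong_induction_on with
  | _ m IH =>
    intro n i hm hi hlt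
    have dm := pvAndDecomp m n
    have di := pvAndDecomp i n
    have dj := pvAndDecomp (m - 1) n
    have lm : m / 2 &&& n / 2 ≤ m / 2 := Nat.and_le_left
    have li : i / 2 &&& n / 2 ≤ i / 2 := Nat.and_le_left
    have hm' : m / 2 &&& n / 2 = m / 2 := by omega
    have hi' : i / 2 &&& n / 2 = i / 2 := by omega
    rcases Nat.mod_two_eq_zero_or_one m with hα | hα
    · -- m even: m - 1 is odd, (m-1)/2 = m/2 - 1
      have hcl : i / 2 < m / 2 := by omega
      have hIH := IH (m / 2) (by omega) (n / 2) (i / 2) hm' hi' hcl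
      have e1 : (m - 1) / 2 = m / 2 - 1 := by omega
      have e2 : (m - 1) % 2 = 1 := by omega
      rw [e1, e2] at dj
      omega
    · -- m odd: (m-1) &&& n = m - 1
      have e1 : (m - 1) / 2 = m / 2 := by omega
      have e2 : (m - 1) % 2 = 0 := by omega
      rw [e1, e2] at dj
      omega

-- a number below 2^t only meets the low bits: c &&& (2^t + y) = c &&& y
theorem pvAndLow (t : Nat) : ∀ c y : Nat, c < 2 ^ t → c &&& (2 ^ t + y) = c &&& y := by
  induction t with
  | zero =>
    intro c y hc
    have : c = 0 := by omega
    subst this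
    simp [Nat.zero_and]
  | succ t IH =>
    intro c y hc
    have d1 := pvAndDecomp c (2 ^ (t + 1) + y)
    have d2 := pvAndDecomp c y
    have e1 : (2 ^ (t + 1) + y) / 2 = 2 ^ t + y / 2 := by
      have : 2 ^ (t + 1) = 2 * 2 ^ t := by ring
      omega
    have e2 : (2 ^ (t + 1) + y) % 2 = y % 2 := by
      have : 2 ^ (t + 1) = 2 * 2 ^ t := by ring
      omega
    rw [e1, e2] at d1
    have hc2 : c / 2 < 2 ^ t := by
      have : 2 ^ (t + 1) = 2 * 2 ^ t := by ring
      omega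
    have hIH := IH (c / 2) (y / 2) hc2
    omega

-- both sides carry bit t and low parts below 2^t: (2^t+c) &&& (2^t+y) = 2^t + (c &&& y)
theorem pvAndHigh (t : Nat) : ∀ c y : Nat, c < 2 ^ t → y < 2 ^ t →
    (2 ^ t + c) &&& (2 ^ t + y) = 2 ^ t + (c &&& y) := by
  induction t with
  | zero =>
    intro c y hc hy
    have hc0 : c = 0 := by omega
    have hy0 : y = 0 := by omega
    subst hc0; subst hy0
    decide
  | succ t IH =>
    intro c y hc hy
    have hp : 2 ^ (t + 1) = 2 * 2 ^ t := by ring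
    have d1 := pvAndDecomp (2 ^ (t + 1) + c) (2 ^ (t + 1) + y)
    have d2 := pvAndDecomp c y
    have e1 : (2 ^ (t + 1) + c) / 2 = 2 ^ t + c / 2 := by omega
    have e2 : (2 ^ (t + 1) + c) % 2 = c % 2 := by omega
    have e3 : (2 ^ (t + 1) + y) / 2 = 2 ^ t + y / 2 := by omega
    have e4 : (2 ^ (t + 1) + y) % 2 = y % 2 := by omega
    rw [e1, e2, e3, e4] at d1
    have hIH := IH (c / 2) (y / 2) (by omega) (by omega)
    omega

-- split a countdown range at any midpoint
theorem pvRangeSplit (a m b : Int) (h1 : b ≤ m) (h2 : m ≤ a) :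
    PySem.List.pyRange a b (-1) =
      PySem.List.pyRange a m (-1) ++ PySem.List.pyRange m b (-1) := by
  rw [PySem.List.pyRange_neg_one_eq_reverse, PySem.List.pyRange_neg_one_eq_reverse,
    PySem.List.pyRange_neg_one_eq_reverse,
    PySem.List.pyRange_one_append (b + 1) (m + 1) (a + 1) (by omega) (by omega)]
  simp

-- the countdown m..h is the countdown r..0 shifted by h (m = h + r)
theorem pvRangeShift (h r : Int) (_hh : 0 ≤ h) (hr : 0 ≤ r) :
    PySem.List.pyRange (h + r) (h - 1) (-1) =
      (PySem.List.pyRange r (-1) (-1)).map (fun x => h + x) := by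
  rw [PySem.List.pyRange_neg_one, PySem.List.pyRange_neg_one, List.map_map]
  have e : (h + r - (h - 1)).toNat = (r - -1).toNat := by omega
  rw [e]
  exact List.map_congr_left (fun k _ => by simp; omega)

-- full(m) is exactly the filtered countdown m..0 keeping the submasks of m
theorem pvFullSubEq (k : Nat) : ∀ m : Int, m.toNat ≤ k → 0 ≤ m →
    fullSub m = (PySem.List.pyRange m (-1) (-1)).filter (fun i => PySem.Int.band i m == i) := by
  induction k with
  | zero =>
    intro m hk h0
    have : m = 0 := by omega
    subst this
    rw [fullSub]
    rw [PySem.List.pyRange_neg_one_cons (by omega), PySem.List.pyRange_neg_one_eq_nil (by omega)]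
    simp [List.filter]
  | succ k IH =>
    intro m hk h0
    by_cases hm0 : m ≤ 0
    · have : m = 0 := by omega
      subst this
      rw [fullSub]
      rw [PySem.List.pyRange_neg_one_cons (by omega), PySem.List.pyRange_neg_one_eq_nil (by omega)]
      simp [List.filter]
    · -- m > 0 : split off the highest bit h = 2^t, t = bitLength m - 1
      have hub := PySem.Int.lt_two_pow_bitLength m
      have hlb := PySem.Int.two_pow_bitLength_le m (by omega)
      have hbl0 : PySem.Int.bitLength m ≠ 0 := by
        intro hb
        rw [hb] at hub
        simp at hub
        omega
      set t : Nat := PySem.Int.bitLength m - 1 with hbl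
      have hblv : PySem.Int.bitLength m = t + 1 := by omega
      rw [hblv] at hub
      -- h = 2^t, r = m - h with 0 ≤ r < h
      set h : Int := 2 ^ t with hh
      set r : Int := m - h with hreq
      have hcast : h = ((2 ^ t : Nat) : Int) := by push_cast; ring
      have hpos : (0 : Nat) < 2 ^ t := Nat.two_pow_pos _
      have hpow : (2 : Nat) ^ (t + 1) = 2 * 2 ^ t := by ring
      have hhm : h ≤ m := by omega
      have hr0 : 0 ≤ r := by omega
      have hrh : r < h := by omega
      have hnat : m.toNat = 2 ^ t + r.toNat := by omega
      -- unfold one step of fullSub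
      rw [fullSub]
      simp only [dif_neg hm0]
      rw [← hbl, ← hh, ← hreq]
      rw [IH r (by omega) hr0]
      -- split the countdown m..0 into m..h, h-1..r+1, r..0
      rw [pvRangeSplit m (h - 1) (-1) (by omega) (by omega),
        pvRangeSplit (h - 1) r (-1) (by omega) (by omega),
        show m = h + r by omega, pvRangeShift h r (by omega) hr0]
      rw [List.filter_append, List.filter_append, List.filter_map]
      -- upper block: band (h+x) m == h+x agrees with band x r == x on x ∈ r..0
      have hup : ∀ x ∈ PySem.List.pyRange r (-1) (-1),
          ((fun i => PySem.Int.band i (h + r) == i) ∘ (fun x => h + x)) x =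
            (PySem.Int.band x r == x) := by
        intro x hx
        rw [PySem.List.mem_pyRange_neg_one] at hx
        simp only [Function.comp]
        rw [Bool.eq_iff_iff, beq_iff_eq, beq_iff_eq]
        rw [PySem.Int.band_of_nonneg (by omega) (by omega),
          PySem.Int.band_of_nonneg (by omega) (by omega)]
        have e1 : (h + x).toNat = 2 ^ t + x.toNat := by omega
        have e2 : (h + r).toNat = 2 ^ t + r.toNat := by omega
        rw [e1, e2, pvAndHigh t x.toNat r.toNat (by omega) (by omega)]
        omega
      -- middle block: nothing between r and h is a submask of m
      have hmid : (PySem.List.pyRange (h - 1) r (-1)).filter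
          (fun i => PySem.Int.band i (h + r) == i) = [] := by
        rw [List.filter_eq_nil_iff]
        intro x hx
        rw [PySem.List.mem_pyRange_neg_one] at hx
        simp only [beq_iff_eq]
        intro hcon
        rw [PySem.Int.band_of_nonneg (by omega) (by omega)] at hcon
        have e2 : (h + r).toNat = 2 ^ t + r.toNat := by omega
        rw [e2, pvAndLow t x.toNat r.toNat (by omega)] at hcon
        have := Nat.and_le_right (n := x.toNat) (m := r.toNat)
        omega
      -- lower block: band x m == x agrees with band x r == x on x ∈ r..0
      have hlow : ∀ x ∈ PySem.List.pyRange r (-1) (-1),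
          (PySem.Int.band x (h + r) == x) = (PySem.Int.band x r == x) := by
        intro x hx
        rw [PySem.List.mem_pyRange_neg_one] at hx
        rw [Bool.eq_iff_iff, beq_iff_eq, beq_iff_eq]
        rw [PySem.Int.band_of_nonneg (by omega) (by omega),
          PySem.Int.band_of_nonneg (by omega) (by omega)]
        have e2 : (h + r).toNat = 2 ^ t + r.toNat := by omega
        rw [e2, pvAndLow t x.toNat r.toNat (by omega)]
      rw [List.filter_congr hup, List.filter_congr hlow, hmid]
      simp
  -- end pvFullSubEq

-- descending filter: everything strictly between j and ss is not a submask, so the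
-- filtered countdown from t collapses to j consed on the countdown from j-1
theorem pvSkip (s ss : Int) (hs : 0 ≤ s) (hss : PySem.Int.band ss s = ss) :
    ∀ (k : Nat) (t : Int), PySem.Int.band (ss - 1) s ≤ t → (t - PySem.Int.band (ss - 1) s).toNat = k →
      t ≤ ss - 1 → 0 < ss →
      (PySem.List.pyRange t (-1) (-1)).filter (fun i => PySem.Int.band i s == i) =
        PySem.Int.band (ss - 1) s ::
          (PySem.List.pyRange (PySem.Int.band (ss - 1) s - 1) (-1) (-1)).filter
            (fun i => PySem.Int.band i s == i) := by
  intro k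
  induction k with
  | zero =>
    intro t h1 h2 h3 h4
    set j := PySem.Int.band (ss - 1) s with hj
    have hj0 : 0 ≤ j := PySem.Int.band_nonneg_of_nonneg_left s (by omega)
    have htj : t = j := by omega
    subst htj
    rw [PySem.List.pyRange_neg_one_cons (by omega)]
    have hpj : PySem.Int.band j s = j := by
      rw [hj]; exact pvBandIdem (ss - 1) s (by omega) hs
    simp [List.filter, hpj]
  | succ k IHk =>
    intro t h1 h2 h3 h4
    set j := PySem.Int.band (ss - 1) s with hj
    have hj0 : 0 ≤ j := PySem.Int.band_nonneg_of_nonneg_left s (by omega)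
    have htj : j < t := by omega
    rw [PySem.List.pyRange_neg_one_cons (by omega)]
    have hpt : (PySem.Int.band t s == t) = false := by
      rw [beq_eq_false_iff_ne]
      intro hsub
      -- t would be a submask of s strictly between j and ss: contradicts pvSubMaskL
      have htn : t.toNat &&& s.toNat = t.toNat := by
        have := hsub
        rw [PySem.Int.band_of_nonneg (by omega) hs] at this
        omega
      have hssn : ss.toNat &&& s.toNat = ss.toNat := by
        have := hss
        rw [PySem.Int.band_of_nonneg (by omega) hs] at this
        omega
      have hlt : t.toNat < ss.toNat := by omega
      have hL := pvSubMaskL ss.toNat s.toNat t.toNat hssn htn hlt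
      have e : (ss - 1).toNat = ss.toNat - 1 := by omega
      have hjn : j = (((ss.toNat - 1) &&& s.toNat : Nat) : Int) := by
        rw [hj, PySem.Int.band_of_nonneg (by omega) hs, e]
      omega
    simp only [List.filter, hpt]
    exact IHk (t - 1) (by omega) (by omega) (by omega) h4

-- the main loop invariant: whenever ss is a nonnegative submask of s with enough fuel,
-- the loop equals the filtered countdown from ss-1
theorem pvLoopEq (s : Int) (hs : 0 ≤ s) :
    ∀ (fuel : Nat) (ss : Int), 0 ≤ ss → ss.toNat ≤ fuel → PySem.Int.band ss s = ss →
      subStateLoop s ss fuel =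
        (PySem.List.pyRange (ss - 1) (-1) (-1)).filter (fun i => PySem.Int.band i s == i) := by
  intro fuel
  induction fuel with
  | zero =>
    intro ss h0 hf _
    have : ss = 0 := by omega
    subst this
    rw [PySem.List.pyRange_neg_one_eq_nil (by omega)]
    rfl
  | succ fuel IH =>
    intro ss h0 hf hss
    by_cases hpos : 0 < ss
    · set j := PySem.Int.band (ss - 1) s with hj
      have hj0 : 0 ≤ j := PySem.Int.band_nonneg_of_nonneg_left s (by omega)
      have hjle : j ≤ ss - 1 := by
        rw [hj, PySem.Int.band_of_nonneg (by omega) hs]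
        have := Nat.and_le_left (n := (ss - 1).toNat) (m := s.toNat)
        omega
      have hjsub : PySem.Int.band j s = j := by
        rw [hj]; exact pvBandIdem (ss - 1) s (by omega) hs
      have hstep : subStateLoop s ss (fuel + 1) = j :: subStateLoop s j fuel := by
        simp [subStateLoop, hpos, hj]
      rw [hstep, IH j hj0 (by omega) hjsub,
        pvSkip s ss hs hss (ss - 1 - j).toNat (ss - 1) hjle rfl (by omega) hpos]
    · have : ss = 0 := by omega
      subst this
      rw [PySem.List.pyRange_neg_one_eq_nil (by omega)]
      simp [subStateLoop]

-- ===== VERDICT (by name: the statement is the Claim_ definition above) =====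
theorem sub_state_spec : Claim_equal_sub_state := by
  intro s _
  unfold Spec_sub_state sub_state sub_state_alt
  by_cases hs : 0 ≤ s
  · rw [pvFullSubEq s.toNat s (le_refl _) hs,
      PySem.List.pyRange_neg_one_cons (by omega)]
    have hself : (PySem.Int.band s s == s) = true := by
      simp [PySem.Int.band_self]
    simp only [List.filter, hself, List.drop_succ_cons, List.drop_zero]
    exact pvLoopEq s hs s.toNat s hs (le_refl _) (PySem.Int.band_self s)
  · have h1 : s.toNat = 0 := by omega
    rw [fullSub, dif_pos (by omega : s ≤ 0), h1]
    rfl
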